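-- pv_equiv track=rewrite | github.com/NotSmartLeague/Esercizi-Domjudge-Primo-Anno | Exercises/R4.py | trova_intero
-- ===== SOURCE A (Python) =====
-- def cerca_ricorrenze(lista, x):
--     ricorrenze = []
--     for i in range(len(lista)):
--         if lista[i] == x:
--             ricorrenze.append(i)
--     return ricorrenze
--
-- def sostituisci(lista, x):
--     for i in range(len(lista)):
--         if lista[i] == x:
--             lista[i] = 0
--     return lista
--
-- def trova_intero(lista, ricorrenze, x, c):
--     if c == 0:
--         return x
--     ricorrenze = cerca_ricorrenze(lista, x)
--     nuova_lista = sostituisci(lista, x)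
--     c = len(ricorrenze)
--     x = c
--     return x + trova_intero(nuova_lista, ricorrenze, x, c)
-- ===== SOURCE B (Python) =====
-- # B: walk the count chain iteratively over the original list, using list.count
-- # once per level and a set of already-zeroed values, instead of A's recursion
-- # that rebuilds an index list and rewrites the list at every level.
-- # (A also zeroes matching entries of `lista` in place; B computes the same
-- # return value without mutating the argument.)
-- def trova_intero(lista, ricorrenze, x, c):
--     if c == 0:
--         return x
--     total = 0
--     cur = x
--     zeroed = set()
--     while True:
--         m = 0 if cur in zeroed else lista.count(cur)
--         if cur != 0:
--             zeroed.add(cur)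
--         total += m
--         if m == 0:
--             return total
--         cur = m
-- ===== Notes on version B (the rewrite author's own statement) =====
-- stated objective: alternative
-- what changed: Instead of recursing with a full index-list rebuild and in-place rewrite of the list at every level of the count chain, B walks the chain iteratively over the original list, taking one list.count per level and tracking already-zeroed values in a set; return value only (A also zeroes matching entries of lista in place, B does not mutate it).
import Mathlib
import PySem

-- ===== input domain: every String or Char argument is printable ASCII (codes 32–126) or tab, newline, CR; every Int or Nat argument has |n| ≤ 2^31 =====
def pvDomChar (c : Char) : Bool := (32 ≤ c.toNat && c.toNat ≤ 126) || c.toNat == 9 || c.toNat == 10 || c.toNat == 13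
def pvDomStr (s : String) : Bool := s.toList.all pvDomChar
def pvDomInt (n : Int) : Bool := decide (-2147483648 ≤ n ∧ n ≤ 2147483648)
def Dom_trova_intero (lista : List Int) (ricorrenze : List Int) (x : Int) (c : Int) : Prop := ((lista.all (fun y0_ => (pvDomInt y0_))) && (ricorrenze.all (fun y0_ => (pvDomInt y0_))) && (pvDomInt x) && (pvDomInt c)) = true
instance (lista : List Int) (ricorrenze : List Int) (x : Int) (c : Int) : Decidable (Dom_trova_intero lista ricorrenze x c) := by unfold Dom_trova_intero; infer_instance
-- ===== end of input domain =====

-- B walks the count chain iteratively over the original list, one count per level with a set of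
-- already-zeroed values, instead of A's recursion that rebuilds an index list and rewrites the list
-- at every level (return value only: the Python A zeroes matching entries of `lista` in place,
-- B does not mutate it).


-- ===== PORT A =====
def cerca_ricorrenze (lista : List Int) (x : Int) : List Int :=
  (PySem.List.pyRange 0 (lista.length : Int) 1).foldl
    (fun acc i => if PySem.List.pyGetD lista i 0 == x then acc ++ [i] else acc) []
def sostituisci (lista : List Int) (x : Int) : List Int :=
  (PySem.List.pyRange 0 (lista.length : Int) 1).foldl
    (fun l i => if PySem.List.pyGetD l i 0 == x then PySem.List.pySetD l i 0 else l) lista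

theorem cerca_length (lista : List Int) (x : Int) :
    (cerca_ricorrenze lista x).length = lista.count x := by
  unfold cerca_ricorrenze
  rw [PySem.List.foldl_append_if (fun i => PySem.List.pyGetD lista i 0 == x) (fun i => i)]
  rw [List.nil_append, List.length_map, ← List.countP_eq_length_filter]
  have h : (fun i => PySem.List.pyGetD lista i 0 == x) = ((· == x) ∘ fun i => PySem.List.pyGetD lista i 0) := rfl
  rw [h, ← List.countP_map, PySem.List.map_pyGetD_pyRange_zero']
  simp [List.count]

-- sost_eq_map via right-induction on the range bound
theorem sost_aux (l : List Int) (x : Int) :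
    ∀ (m : Nat), m ≤ l.length →
      (PySem.List.pyRange 0 (m : Int) 1).foldl
        (fun s i => if PySem.List.pyGetD s i 0 == x then PySem.List.pySetD s i 0 else s) l
      = (l.take m).map (fun v => if v = x then 0 else v) ++ l.drop m := by
  intro m
  induction m with
  | zero => simp [PySem.List.pyRange_one_eq_nil]
  | succ m ih =>
    intro hm
    have hm' : m ≤ l.length := Nat.le_of_succ_le hm
    have hlt : m < l.length := hm
    have hcast : ((m + 1 : Nat) : Int) = (m : Int) + 1 := by push_cast; ring
    rw [hcast, PySem.List.pyRange_one_succ_right (by positivity), List.foldl_append, ih hm']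
    set s := (l.take m).map (fun v => if v = x then 0 else v) ++ l.drop m with hs
    have hslen : s.length = l.length := by
      simp [hs, Nat.min_eq_left hm']
      omega
    have hget : PySem.List.pyGetD s (m : Int) 0 = l[m] := by
      rw [PySem.List.pyGetD_natCast]
      rw [hs, List.getD_eq_getElem?_getD, List.getElem?_append_right (by simp [Nat.min_eq_left hm'])]
      simp [Nat.min_eq_left hm', List.getElem?_drop, List.getElem?_eq_getElem hlt]
    simp only [List.foldl_cons, List.foldl_nil]
    rw [hget]
    have hdrop : l.drop m = l[m] :: l.drop (m+1) := List.drop_eq_getElem_cons hlt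
    have htake : l.take (m+1) = l.take m ++ [l[m]] := by
      rw [List.take_add_one, List.getElem?_eq_getElem hlt]; rfl
    by_cases hx : l[m] = x
    · simp only [hx, BEq.rfl, if_true]
      rw [PySem.List.pySetD_natCast, hs, hdrop, htake]
      have hlen : ((l.take m).map (fun v => if v = x then 0 else v)).length = m := by
        simp [Nat.min_eq_left hm']
      rw [List.map_append, List.set_append_right _ _ (by omega), hlen]
      simp [hx]
    · have hbeq : (l[m] == x) = false := by simp [hx]
      simp only [hbeq, if_false, Bool.false_eq_true]
      rw [hs, hdrop, htake, List.map_append]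
      simp [hx]

theorem sost_eq_map (lista : List Int) (x : Int) :
    sostituisci lista x = lista.map (fun v => if v = x then 0 else v) := by
  unfold sostituisci
  rw [sost_aux lista x lista.length le_rfl]
  simp

theorem sost_zero (lista : List Int) : sostituisci lista 0 = lista := by
  rw [sost_eq_map]
  have : (fun v : Int => if v = 0 then (0:Int) else v) = id := by
    funext v; by_cases h : v = 0 <;> simp [h]
  rw [this, List.map_id]

theorem countP_map_le (l : List Int) (x : Int) :
    (l.map (fun v => if v = x then 0 else v)).countP (fun v => decide (v ≠ 0)) ≤
      l.countP (fun v => decide (v ≠ 0)) := by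
  rw [List.countP_map]
  apply List.countP_mono_left
  intro v _ h
  simp only [Function.comp] at h
  by_cases hv : v = x
  · simp [hv] at h
  · simpa [hv] using h

theorem sost_countP_lt (lista : List Int) (x : Int) (hx : x ≠ 0) (hc : 0 < lista.count x) :
    (sostituisci lista x).countP (fun v => decide (v ≠ 0)) <
      lista.countP (fun v => decide (v ≠ 0)) := by
  rw [sost_eq_map]
  induction lista with
  | nil => simp at hc
  | cons a t ih =>
    have hle := countP_map_le t x
    rw [List.count_cons] at hc
    by_cases ha : a = x
    · subst ha
      simp only [List.map_cons, List.countP_cons]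
      simp only [decide_eq_true_eq] at *
      have h0 : ¬ ((0:Int) ≠ 0) := by simp
      simp [h0, hx] at hle ⊢
      omega
    · have hc' : 0 < t.count x := by
        have hba : (a == x) = false := by simp [ha]
        rw [hba] at hc; simpa using hc
      have := ih hc'
      simp only [List.map_cons, List.countP_cons, if_neg ha]
      omega

def trova_intero (lista : List Int) (ricorrenze : List Int) (x : Int) (c : Int) : Int :=
  if c == 0 then x
  else
    let ricorrenze' := cerca_ricorrenze lista x
    let nuova_lista := sostituisci lista x
    let c' : Int := (ricorrenze'.length : Int)
    let x' : Int := c'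
    x' + trova_intero nuova_lista ricorrenze' x' c'
termination_by
  (if c = 0 then 0 else 4 * lista.countP (fun v => decide (v ≠ 0)) + (if x = 0 then 2 else 1))
decreasing_by
  rename_i h
  have hc : c ≠ 0 := by simpa using h
  rw [if_neg hc]
  by_cases h0 : ((cerca_ricorrenze lista x).length : Int) = 0
  · rw [if_pos h0]
    have : 1 ≤ (if x = 0 then 2 else 1) := by split <;> omega
    omega
  · rw [if_neg h0]
    have hcount : 0 < lista.count x := by
      have hl := cerca_length lista x
      omega
    by_cases hx : x = 0
    · subst hx
      rw [sost_zero, if_neg h0, if_pos rfl]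
      omega
    · have hlt := sost_countP_lt lista x hx hcount
      have h2 : (if ((cerca_ricorrenze lista x).length : Int) = 0 then 2 else 1) ≤ 2 := by
        split <;> omega
      rw [if_neg hx]
      omega

-- ===== PORT B =====
-- fact cited by altLoop's termination proof (hence above the def)
theorem countP_not_mem_add_lt (L : List Int) (z : PySem.Set Int) (cur : Int)
    (hmem : cur ∈ L) (hz : cur ∉ z) :
    L.countP (fun v => decide (v ∉ PySem.Set.add z cur)) <
      L.countP (fun v => decide (v ∉ z)) := by
  induction L with
  | nil => simp at hmem
  | cons a t ih =>
    have hle : t.countP (fun v => decide (v ∉ PySem.Set.add z cur)) ≤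
        t.countP (fun v => decide (v ∉ z)) := by
      apply List.countP_mono_left
      intro v _ h
      simp only [decide_eq_true_eq, PySem.Set.mem_add] at *
      exact fun hvz => h (Or.inl hvz)
    rcases List.mem_cons.mp hmem with h | h
    · subst h
      simp only [List.countP_cons]
      have h1 : decide (cur ∉ PySem.Set.add z cur) = false := by
        simp [PySem.Set.mem_add]
      have h2 : decide (cur ∉ z) = true := by simpa using hz
      rw [h1, h2]
      simp only [Bool.false_eq_true, if_false, if_true]
      omega
    · have hih := ih h
      simp only [List.countP_cons]
      have hpt : (decide (a ∉ PySem.Set.add z cur) = true → decide (a ∉ z) = true) := by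
        simp only [decide_eq_true_eq, PySem.Set.mem_add]
        exact fun h hvz => h (Or.inl hvz)
      by_cases hp : decide (a ∉ PySem.Set.add z cur) = true
      · rw [hp, hpt hp]; omega
      · simp only [Bool.not_eq_true] at hp
        rw [hp]
        have : (if (false = true) then 1 else 0) = 0 := by simp
        rw [this]
        have hcase : (if decide (a ∉ z) = true then 1 else 0) ≤ 1 := by split <;> omega
        omega

def altLoop (lista : List Int) (zeroed : PySem.Set Int) (total : Int) (cur : Int) : Int :=
  let m : Int := if cur ∈ zeroed then 0 else (lista.count cur : Int)
  let zeroed' := if cur == 0 then zeroed else PySem.Set.add zeroed cur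
  let total' := total + m
  if m == 0 then total' else altLoop lista zeroed' total' m
termination_by
  4 * ((PySem.Set.ofList lista).countP (fun v => decide (v ∉ zeroed))) + (if cur = 0 then 2 else 1)
decreasing_by
  rename_i h
  have h' : ¬ ((if _h : cur ∈ zeroed then (0:Int) else (lista.count cur : Int)) == 0) = true := h
  have hpair : cur ∉ zeroed ∧ ¬ lista.count cur = 0 := by simpa using h'
  have hin : cur ∉ zeroed := hpair.1
  have hm0 : ((lista.count cur : Int)) ≠ 0 := by
    intro h0
    exact hpair.2 (by exact_mod_cast h0)
  have hmem : cur ∈ PySem.Set.ofList lista := by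
    rw [PySem.Set.mem_ofList]
    exact List.count_pos_iff.mp (Nat.pos_of_ne_zero hpair.2)
  by_cases hc : cur = 0
  · simp only [dif_neg hin, dif_pos (show ((cur == 0) = true) from by simp [hc]),
      if_pos hc, if_neg hm0]
    omega
  · simp only [dif_neg hin, dif_neg (show ¬ ((cur == 0) = true) from by simp [hc]),
      if_neg hc, if_neg hm0]
    have := countP_not_mem_add_lt (PySem.Set.ofList lista) zeroed cur hmem hin
    omega

def trova_intero_alt (lista : List Int) (ricorrenze : List Int) (x : Int) (c : Int) : Int :=
  if c == 0 then x
  else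
    let zeroed : PySem.Set Int := PySem.Set.ofList []
    altLoop lista zeroed 0 x

-- ===== PRECONDITION & SPEC =====
def Spec_trova_intero (lista : List Int) (ricorrenze : List Int) (x : Int) (c : Int) (out : Int) : Prop := out = trova_intero_alt lista ricorrenze x c
instance (lista : List Int) (ricorrenze : List Int) (x : Int) (c : Int) (out : Int) : Decidable (Spec_trova_intero lista ricorrenze x c out) := by unfold Spec_trova_intero; infer_instance

-- ===== CLAIM (what is proved, stated in full; the proofs are below) =====
def Claim_equal_trova_intero : Prop := ∀ (lista : List Int) (ricorrenze : List Int) (x : Int) (c : Int), Dom_trova_intero lista ricorrenze x c → Spec_trova_intero lista ricorrenze x c (trova_intero lista ricorrenze x c)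

-- ===== LEMMAS AND PROOFS =====
theorem count_map_self (l : List Int) (x : Int) (hx : x ≠ 0) :
    (l.map (fun v => if v = x then 0 else v)).count x = 0 := by
  induction l with
  | nil => simp
  | cons a t ih =>
    rw [List.map_cons, List.count_cons, ih]
    by_cases ha : a = x
    · simp [ha, Ne.symm hx]
    · simp [ha]

theorem count_map_other (l : List Int) (x v : Int) (hv : v ≠ 0) (hvx : v ≠ x) :
    (l.map (fun v' => if v' = x then 0 else v')).count v = l.count v := by
  induction l with
  | nil => simp
  | cons a t ih =>
    rw [List.map_cons, List.count_cons, List.count_cons, ih]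
    by_cases ha : a = x
    · have h1 : ((if a = x then (0:Int) else a) == v) = false := by
        simp [ha, Ne.symm hv]
      have h2 : (a == v) = false := by
        simp [ha]
        intro hh
        exact hvx hh.symm
      rw [h1, h2]
    · simp [ha]

theorem loop_eq :
    ∀ (N : Nat) (l lista0 : List Int) (zeroed : PySem.Set Int) (total cur : Int)
      (r : List Int) (c : Int),
      l.countP (fun v => decide (v ≠ 0)) = N → cur ≠ 0 → c ≠ 0 →
      (∀ v : Int, v ≠ 0 → (if v ∈ zeroed then (0:Int) else (lista0.count v : Int)) = (l.count v : Int)) →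
      altLoop lista0 zeroed total cur = total + trova_intero l r cur c := by
  intro N
  induction N using Nat.strong_induction_on with
  | _ N ih =>
    intro l lista0 zeroed total cur r c hN hcur hc hinv
    have hm := hinv cur hcur
    have hbc : (c == 0) = false := by simp [hc]
    have hbcur : (cur == 0) = false := by simp [hcur]
    rw [trova_intero]
    rw [altLoop]
    simp only [hbc, hbcur, Bool.false_eq_true, if_false, hm, cerca_length]
    by_cases h0 : l.count cur = 0
    · have hz : ((l.count cur : Int) == 0) = true := by simp [h0]
      rw [hz]
      simp only [if_true]
      rw [trova_intero]
      simp [h0]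
    · have hne : ((l.count cur : Int) == 0) = false := by simp [h0]
      rw [hne]
      simp only [Bool.false_eq_true, if_false]
      set m : Int := (l.count cur : Int) with hmdef
      have hmne : m ≠ 0 := by simp [hmdef, h0]
      have hlt := sost_countP_lt l cur hcur (Nat.pos_of_ne_zero h0)
      rw [sost_eq_map] at hlt
      have hinv' : ∀ v : Int, v ≠ 0 →
          (if v ∈ PySem.Set.add zeroed cur then (0:Int) else (lista0.count v : Int)) =
            (((l.map (fun v' => if v' = cur then 0 else v')).count v : Nat) : Int) := by
        intro v hv
        by_cases hvc : v = cur
        · rw [if_pos (by rw [PySem.Set.mem_add]; exact Or.inr hvc), hvc,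
            count_map_self l cur hcur]
          simp
        · have hmem : (v ∈ PySem.Set.add zeroed cur) ↔ v ∈ zeroed := by
            rw [PySem.Set.mem_add]
            exact ⟨fun h => h.resolve_right hvc, Or.inl⟩
          rw [count_map_other l cur v hv hvc, ← hinv v hv]
          by_cases hvz : v ∈ zeroed
          · rw [if_pos (hmem.mpr hvz), if_pos hvz]
          · rw [if_neg (fun hh => hvz (hmem.mp hh)), if_neg hvz]
      have hrec := ih ((l.map (fun v' => if v' = cur then 0 else v')).countP (fun v => decide (v ≠ 0)))
        (by omega) (l.map (fun v' => if v' = cur then 0 else v')) lista0 (PySem.Set.add zeroed cur)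
        (total + m) m (cerca_ricorrenze l cur) m rfl hmne hmne hinv'
      rw [sost_eq_map, hrec]
      ring

-- ===== VERDICT (by name: the statement is the Claim_ definition above) =====
theorem trova_intero_spec : Claim_equal_trova_intero := by
  unfold Claim_equal_trova_intero Spec_trova_intero
  intro l r x c _
  by_cases hc : c = 0
  · rw [trova_intero, trova_intero_alt]
    simp [hc]
  · have hbc : (c == 0) = false := by simp [hc]
    rw [trova_intero_alt]
    simp only [hbc, Bool.false_eq_true, if_false]
    have hinv0 : ∀ v : Int, v ≠ 0 →
        (if v ∈ PySem.Set.ofList ([] : List Int) then (0:Int) else (l.count v : Int)) = (l.count v : Int) := by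
      intro v _
      rw [if_neg (by simp)]
    by_cases hx : x = 0
    · subst hx
      rw [trova_intero]
      simp only [hbc, Bool.false_eq_true, if_false, cerca_length]
      rw [altLoop]
      have hget : (if (0:Int) ∈ PySem.Set.ofList ([] : List Int) then (0:Int) else (l.count 0 : Int))
          = (l.count 0 : Int) := by
        rw [if_neg (by simp)]
      simp only [BEq.rfl, if_true, hget]
      by_cases h0 : l.count 0 = 0
      · have hz : ((l.count 0 : Int) == 0) = true := by simp [h0]
        rw [hz]
        simp only [if_true]
        rw [trova_intero]
        simp [h0]
      · have hne : ((l.count 0 : Int) == 0) = false := by simp [h0]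
        rw [hne]
        simp only [Bool.false_eq_true, if_false]
        rw [sost_zero]
        rw [loop_eq (l.countP fun v => decide (v ≠ 0)) l l _ (0 + (l.count 0 : Int))
          (l.count 0 : Int) (cerca_ricorrenze l 0) (l.count 0 : Int) rfl
          (by simp [h0]) (by simp [h0]) hinv0]
        ring
    · rw [loop_eq (l.countP fun v => decide (v ≠ 0)) l l _ 0 x r c rfl hx hc hinv0]
      ring
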